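-- pv_equiv track=rewrite | github.com/ghcarneiro/rahrad | website/search_engine2.py | getDerivations
-- ===== SOURCE A (Python) =====
-- def getDerivations(searchTerm, dictionary):
-- 	newSearchTerm = []
-- 	for word in searchTerm:
-- 		for i in range(len(word)):
-- 			if i == 0:
-- 				if word in dictionary.values():
-- 					newSearchTerm.append(word)
-- 			else:
-- 				if word[:-i] in dictionary.values():
-- 					newSearchTerm.append(word[:-i])
-- 	return newSearchTerm
-- ===== SOURCE B (Python) =====
-- def getDerivations(searchTerm, dictionary):
-- 	values = set(dictionary.values())
-- 	newSearchTerm = []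
-- 	for word in searchTerm:
-- 		matches = []
-- 		prefix = ""
-- 		for ch in word:
-- 			prefix += ch
-- 			if prefix in values:
-- 				matches.append(prefix)
-- 		newSearchTerm.extend(reversed(matches))
-- 	return newSearchTerm
-- ===== Notes on version B (the rewrite author's own statement) =====
-- stated objective: faster
-- what changed: B builds a set of dictionary.values() once and walks each word character by character collecting matching prefixes shortest-first (reversed at the end), instead of A's per-prefix slicing with a fresh linear scan of dictionary.values() for every prefix length.
import Mathlib
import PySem

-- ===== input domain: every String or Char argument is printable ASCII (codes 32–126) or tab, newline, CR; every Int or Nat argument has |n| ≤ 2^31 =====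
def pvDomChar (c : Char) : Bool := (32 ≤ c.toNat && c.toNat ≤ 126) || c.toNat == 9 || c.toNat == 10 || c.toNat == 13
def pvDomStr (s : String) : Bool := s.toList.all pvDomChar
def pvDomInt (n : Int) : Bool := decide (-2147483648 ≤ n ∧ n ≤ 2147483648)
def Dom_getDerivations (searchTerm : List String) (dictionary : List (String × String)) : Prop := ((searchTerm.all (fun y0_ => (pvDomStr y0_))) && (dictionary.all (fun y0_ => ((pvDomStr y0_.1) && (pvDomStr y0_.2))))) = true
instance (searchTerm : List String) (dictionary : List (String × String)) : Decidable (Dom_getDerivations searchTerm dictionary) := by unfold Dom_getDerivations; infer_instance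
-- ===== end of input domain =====

-- B replaces A's per-prefix linear scan of dictionary.values() (recomputed by slicing, longest prefix first)
-- with one set of the values built once and a single character-by-character walk per word collecting matches
-- shortest-first, reversed at the end; objective: faster (the inner scan of the values disappears).


-- ===== PORT A =====
def getDerivations (searchTerm : List String) (dictionary : List (String × String)) : List String :=
  searchTerm.foldl (fun newSearchTerm word =>
    (PySem.List.pyRange 0 (PySem.Str.len word) 1).foldl (fun acc i =>
      if i = 0 then
        if (PySem.Dict.values (PySem.Dict.ofList dictionary)).contains word then
          acc ++ [word]
        else acc
      else
        if (PySem.Dict.values (PySem.Dict.ofList dictionary)).contains (PySem.Str.slice word none (some (-i))) then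
          acc ++ [PySem.Str.slice word none (some (-i))]
        else acc) newSearchTerm) []

-- ===== PORT B =====
def getDerivations_alt (searchTerm : List String) (dictionary : List (String × String)) : List String :=
  let values : PySem.Set String := PySem.Set.ofList (PySem.Dict.values (PySem.Dict.ofList dictionary))
  searchTerm.foldl (fun newSearchTerm word =>
    let st := word.toList.foldl (fun (st : String × List String) ch =>
      let p := st.1.push ch
      (p, if values.contains p then st.2 ++ [p] else st.2)) ("", [])
    newSearchTerm ++ st.2.reverse) []

-- ===== PRECONDITION & SPEC =====
def Spec_getDerivations (searchTerm : List String) (dictionary : List (String × String)) (out : List String) : Prop := out = getDerivations_alt searchTerm dictionary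
instance (searchTerm : List String) (dictionary : List (String × String)) (out : List String) : Decidable (Spec_getDerivations searchTerm dictionary out) := by unfold Spec_getDerivations; infer_instance

-- ===== CLAIM (what is proved, stated in full; the proofs are below) =====
def Claim_equal_getDerivations : Prop := ∀ (searchTerm : List String) (dictionary : List (String × String)), Dom_getDerivations searchTerm dictionary → Spec_getDerivations searchTerm dictionary (getDerivations searchTerm dictionary)

-- ===== LEMMAS AND PROOFS =====

-- Set-of-values membership in B agrees with list membership in A.
lemma contains_ofList_eq (vals : List String) (p : String) :
    PySem.Set.contains (PySem.Set.ofList vals) p = vals.contains p := by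
  by_cases h : p ∈ vals
  · have h1 : PySem.Set.contains (PySem.Set.ofList vals) p = true :=
      (PySem.Set.contains_iff _ _).mpr ((PySem.Set.mem_ofList vals p).mpr h)
    have h2 : vals.contains p = true := List.contains_iff_mem.mpr h
    rw [h1, h2]
  · have h1 : PySem.Set.contains (PySem.Set.ofList vals) p ≠ true :=
      fun hc => h ((PySem.Set.mem_ofList vals p).mp ((PySem.Set.contains_iff _ _).mp hc))
    have h2 : vals.contains p ≠ true := fun hc => h (List.contains_iff_mem.mp hc)
    simp only [ne_eq, Bool.not_eq_true] at h1 h2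
    rw [h1, h2]

-- A's inner loop over range(len(word)) collects, longest first, the prefixes of word that are values.
lemma A_inner (vals : List String) (w : String) (acc : List String) :
    (PySem.List.pyRange 0 (PySem.Str.len w) 1).foldl (fun acc i =>
      if i = 0 then
        if vals.contains w then acc ++ [w] else acc
      else
        if vals.contains (PySem.Str.slice w none (some (-i))) then
          acc ++ [PySem.Str.slice w none (some (-i))]
        else acc) acc
    = acc ++ ((List.range w.toList.length).map
        (fun k => String.ofList (w.toList.take (w.toList.length - k)))).filter vals.contains := by
  have hg : ∀ k : Nat, 0 < k →
      PySem.Str.slice w none (some (-(k : Int))) = String.ofList (w.toList.take (w.toList.length - k)) := by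
    intro k hk
    apply String.toList_inj.mp
    simp [PySem.Str.toList_slice, PySem.List.slice_to_neg_natCast _ _ hk]
  rw [PySem.Str.len_eq, PySem.List.pyRange_zero_nat, List.foldl_map]
  rw [PySem.List.foldl_congr_mem (List.range w.toList.length) _
      (fun (acc : List String) (k : Nat) =>
        if vals.contains (String.ofList (w.toList.take (w.toList.length - k))) then
          acc ++ [String.ofList (w.toList.take (w.toList.length - k))]
        else acc) acc
      (by
        intro acc k _
        rcases Nat.eq_zero_or_pos k with hk | hk
        · subst hk
          have hw : String.ofList (List.take w.length w.toList) = w := by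
            rw [← String.length_toList, List.take_length, String.ofList_toList]
          simp [hw]
        · have hk0 : ((k : Int) = 0) = False := by
            simp [Int.natCast_eq_zero]; omega
          simp only [hk0, if_false, hg k hk])]
  rw [PySem.List.foldl_append_if, List.filter_map]
  rfl

-- B's inner loop: ascending prefixes, as a recursive list.
def ascPref (s : String) : List Char → List String
  | [] => []
  | c :: cs => (s.push c) :: ascPref (s.push c) cs

lemma B_inner (C : String → Bool) (cs : List Char) :
    ∀ (s : String) (m : List String),
      ((cs.foldl (fun (st : String × List String) ch =>
        (st.1.push ch, if C (st.1.push ch) then st.2 ++ [st.1.push ch] else st.2)) (s, m)).2)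
      = m ++ (ascPref s cs).filter C := by
  induction cs with
  | nil => intro s m; simp [ascPref]
  | cons c cs ih =>
    intro s m
    simp only [List.foldl_cons, ascPref, List.filter_cons]
    rw [ih]
    by_cases h : C (s.push c) <;> simp [h]

lemma ascPref_eq (cs : List Char) : ∀ s : String,
    ascPref s cs = (List.range cs.length).map (fun k => String.ofList (s.toList ++ cs.take (k + 1))) := by
  induction cs with
  | nil => intro s; simp [ascPref]
  | cons c cs ih =>
    intro s
    simp only [ascPref, List.length_cons, List.range_succ_eq_map, List.map_cons, List.map_map]
    refine List.cons_eq_cons.mpr ⟨?_, ?_⟩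
    · apply String.toList_inj.mp
      simp
    · rw [ih (s.push c)]
      apply List.map_congr_left
      intro k _
      simp [Function.comp, String.toList_push]

-- the descending prefix list is the reverse of the ascending one
lemma desc_eq_reverse_asc (cs : List Char) (f : Nat → String) :
    (List.range cs.length).map (fun k => f (cs.length - k))
      = ((List.range cs.length).map (fun k => f (k + 1))).reverse := by
  apply List.ext_getElem
  · simp
  · intro i h1 h2
    simp only [List.length_map, List.length_range] at h1 h2
    rw [List.getElem_map, List.getElem_range, List.getElem_reverse]
    simp only [List.length_map, List.length_range, List.getElem_map, List.getElem_range]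
    congr 1
    omega

-- the per-word outputs of the two programs coincide
lemma word_eq (vals : List String) (w : String) (acc : List String) :
    (PySem.List.pyRange 0 (PySem.Str.len w) 1).foldl (fun acc i =>
      if i = 0 then
        if vals.contains w then acc ++ [w] else acc
      else
        if vals.contains (PySem.Str.slice w none (some (-i))) then
          acc ++ [PySem.Str.slice w none (some (-i))]
        else acc) acc
    = acc ++ ((w.toList.foldl (fun (st : String × List String) ch =>
        (st.1.push ch, if vals.contains (st.1.push ch) then st.2 ++ [st.1.push ch] else st.2))
        ("", [])).2).reverse := by
  rw [A_inner, B_inner vals.contains w.toList "" [], ascPref_eq]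
  simp only [List.nil_append, String.toList_empty]
  rw [desc_eq_reverse_asc w.toList (fun k => String.ofList (w.toList.take k)), List.filter_reverse]

-- ===== VERDICT (by name: the statement is the Claim_ definition above) =====
theorem getDerivations_spec : Claim_equal_getDerivations := by
  intro searchTerm dictionary _
  unfold Spec_getDerivations getDerivations getDerivations_alt
  simp only []
  apply PySem.List.foldl_congr_mem
  intro acc w _
  rw [word_eq]
  have hfold : w.toList.foldl (fun (st : String × List String) ch =>
        (st.1.push ch,
          if (PySem.Set.ofList ((PySem.Dict.ofList dictionary).values)).contains (st.1.push ch) then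
            st.2 ++ [st.1.push ch]
          else st.2)) ("", [])
      = w.toList.foldl (fun (st : String × List String) ch =>
        (st.1.push ch,
          if ((PySem.Dict.ofList dictionary).values).contains (st.1.push ch) then
            st.2 ++ [st.1.push ch]
          else st.2)) ("", []) := by
    apply PySem.List.foldl_congr_mem
    intro st ch _
    rw [contains_ofList_eq]
  rw [hfold]
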